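-- pv_equiv track=rewrite | github.com/matuspintek-boop/ib111 | 10/p1_squaresum.py | helper
-- ===== SOURCE A (Python) =====
-- import math
--
-- def remaining_sum(list_: list[int]) -> int:
--     sum_: int = 0
--     for item in list_:
--         sum_ += item
--     return sum_
--
-- def helper(total: int, last_used: int, remaining: int, num: int) -> bool:
--     if remaining == 0:
--         return total == num
--     if total > num:
--         return False
--
--     i_max = math.isqrt(num - total)
--
--     max_possible = remaining_sum([(i_max - k)**2 for k in range(remaining)])
--     if total + max_possible < num:
--         return False
--
--     for i in range(last_used + 1, i_max + 1):
--         if helper(total + i*i, i, remaining - 1, num):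
--             return True
--     return False
-- ===== SOURCE B (Python) =====
-- import math
--
-- def helper(total: int, last_used: int, remaining: int, num: int) -> bool:
--     # Iterative depth-first search with an explicit stack of (total, last_used,
--     # remaining) states instead of recursion; children are pushed in descending
--     # i order so the smallest candidate is explored first, as in a left-to-right
--     # depth-first traversal.
--     stack = [(total, last_used, remaining)]
--     while stack:
--         t, l, r = stack.pop()
--         if r == 0:
--             if t == num:
--                 return True
--             continue
--         if t > num:
--             continue
--         i_max = math.isqrt(num - t)
--         if t + sum((i_max - k) ** 2 for k in range(r)) < num:
--             continue
--         for i in range(i_max, l, -1):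
--             stack.append((t + i * i, i, r - 1))
--     return False
-- ===== Notes on version B (the rewrite author's own statement) =====
-- stated objective: alternative
-- what changed: B replaces A's recursive depth-first backtracking by an iterative while loop over an explicit stack of (total, last_used, remaining) states: frames are popped, dead or pruned frames are discarded, and a frame's candidate children are pushed back, returning True as soon as a completed state hits num (same pruning rule, hence the same search tree).
import Mathlib
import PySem

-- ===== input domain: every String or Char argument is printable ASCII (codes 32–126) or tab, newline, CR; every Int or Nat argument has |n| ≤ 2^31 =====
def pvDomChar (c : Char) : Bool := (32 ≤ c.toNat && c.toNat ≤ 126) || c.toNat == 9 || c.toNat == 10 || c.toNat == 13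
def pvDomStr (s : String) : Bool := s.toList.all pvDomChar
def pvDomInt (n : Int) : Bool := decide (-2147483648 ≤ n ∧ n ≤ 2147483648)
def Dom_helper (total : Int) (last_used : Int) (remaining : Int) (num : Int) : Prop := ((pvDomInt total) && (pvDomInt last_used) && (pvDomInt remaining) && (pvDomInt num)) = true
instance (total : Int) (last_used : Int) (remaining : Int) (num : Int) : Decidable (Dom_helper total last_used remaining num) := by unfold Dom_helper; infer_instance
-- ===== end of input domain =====

-- B replaces A's recursion by an iterative depth-first search over an explicit stack of
-- (total, last_used, remaining) states — same pruned search tree (objective: alternative).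

-- ===== PORT A =====
-- Termination guard for both ports: a fuel counter started at pvMu + 1, which the lemmas
-- below prove strictly sufficient, so the `fuel = 0` branch is never taken.
def pvMu (total : Int) (last_used : Int) (num : Int) : Nat :=
  2 * (num - total).toNat + (if total ≤ num ∧ last_used < 0 then 1 else 0)

-- A's module helper `remaining_sum`
def remaining_sum (list_ : List Int) : Int :=
  list_.foldl (fun sum_ item => sum_ + item) 0

-- literal transliteration of A's recursion; `math.isqrt (num-total)` is ported as
-- `Nat.sqrt (num-total).toNat`, exact because at that point `num - total ≥ 0`
def helperGo : Nat → Int → Int → Int → Int → Bool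
  | 0, _, _, _, _ => false
  | fuel + 1, total, last_used, remaining, num =>
    if remaining == 0 then total == num
    else if total > num then false
    else
      let i_max : Int := ((num - total).toNat.sqrt : Int)
      let max_possible := remaining_sum ((PySem.List.pyRange 0 remaining 1).map (fun k => (i_max - k) ^ 2))
      if total + max_possible < num then false
      else
        (PySem.List.pyRange (last_used + 1) (i_max + 1) 1).any
          (fun i => helperGo fuel (total + i * i) i (remaining - 1) num)

def helper (total : Int) (last_used : Int) (remaining : Int) (num : Int) : Bool :=
  helperGo (pvMu total last_used num + 1) total last_used remaining num

lemma pv_one_le_sq {i : Int} (h : i ≠ 0) : 1 ≤ i * i := by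
  rcases lt_or_gt_of_ne h with hlt | hgt
  · nlinarith
  · nlinarith

-- the fuel measure strictly decreases along every edge of the search tree
lemma pvMu_dec {t l i n : Int} (ht : t ≤ n) (hl : l + 1 ≤ i)
    (hi : i ≤ ((n - t).toNat.sqrt : Int)) :
    pvMu (t + i * i) i n + 1 ≤ pvMu t l n := by
  by_cases hz : i = 0
  · subst hz
    simp only [pvMu, mul_zero, add_zero]
    split_ifs <;> omega
  · have hsq : 1 ≤ i * i := pv_one_le_sq hz
    by_cases hc : t + i * i ≤ n
    · simp only [pvMu]
      split_ifs <;> omega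
    · have hkey : t < n ∨ l < 0 := by
        by_cases hteq : t = n
        · have h00 : (n - t).toNat = 0 := by omega
          rw [h00] at hi
          simp only [Nat.sqrt_zero, Int.natCast_zero] at hi
          right; omega
        · left; omega
      simp only [pvMu]
      split_ifs <;> omega

-- ===== PORT B =====
-- the fuel measure of one stack frame (t, l, r) ↦ pvMu t l num
def pvRank (num : Int) (f : Int × Int × Int) : Nat := pvMu f.1 f.2.1 num

-- one stack step replaces the popped frame by strictly smaller-ranked children:
-- a Dershowitz–Manna decrease of the multiset of frame ranks (used by `decreasing_by`)
lemma pvStep (num : Int) (f : Int × Int × Int) (rest children : List (Int × Int × Int))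
    (h : ∀ c ∈ children, pvRank num c < pvRank num f) :
    Multiset.IsDershowitzMannaLT
      (((children ++ rest).map (pvRank num) : List Nat) : Multiset Nat)
      (((f :: rest).map (pvRank num) : List Nat) : Multiset Nat) := by
  refine ⟨(rest.map (pvRank num) : List Nat), (children.map (pvRank num) : List Nat),
    {pvRank num f}, by simp, ?_, ?_, ?_⟩
  · simp only [List.map_append, ← Multiset.coe_add]
    exact add_comm _ _
  · simp only [List.map_cons, ← Multiset.cons_coe, ← Multiset.singleton_add]
    exact add_comm _ _
  · intro y hy
    simp only [Multiset.mem_coe, List.mem_map] at hy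
    obtain ⟨c, hc, rfl⟩ := hy
    exact ⟨pvRank num f, by simp, h c hc⟩

-- B's `while stack:` loop.  Python pushes the children with i = i_max … l+1 (descending)
-- at the END of the list and pops from the end; modelling the stack with its TOP AT THE
-- HEAD, this is exactly the ascending-i child list prepended to the rest of the stack.
def dfsGo (num : Int) (stack : List (Int × Int × Int)) : Bool :=
  match stack with
  | [] => false
  | (t, l, r) :: rest =>
    if r == 0 then
      if t == num then true else dfsGo num rest
    else if hgt : t > num then dfsGo num rest
    else if t + ((PySem.List.pyRange 0 r 1).map
        (fun k => ((((num - t).toNat.sqrt : Int)) - k) ^ 2)).sum < num then dfsGo num rest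
    else
      dfsGo num (((PySem.List.pyRange (l + 1) (((num - t).toNat.sqrt : Int) + 1) 1).map
        (fun i => (t + i * i, i, r - 1))) ++ rest)
termination_by ((stack.map (pvRank num) : List Nat) : Multiset Nat)
decreasing_by
  · simpa using pvStep num (t, l, r) rest [] (by simp)
  · simpa using pvStep num (t, l, r) rest [] (by simp)
  · simpa using pvStep num (t, l, r) rest [] (by simp)
  · refine pvStep num (t, l, r) rest _ ?_
    intro c hc
    simp only [List.mem_map] at hc
    obtain ⟨i, hi, rfl⟩ := hc
    rw [PySem.List.mem_pyRange_one] at hi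
    have := pvMu_dec (t := t) (l := l) (i := i) (n := num) (by omega) hi.1 (by omega)
    simp only [pvRank]
    omega

def helper_alt (total : Int) (last_used : Int) (remaining : Int) (num : Int) : Bool :=
  dfsGo num [(total, last_used, remaining)]

-- ===== PRECONDITION & SPEC =====
def Spec_helper (total : Int) (last_used : Int) (remaining : Int) (num : Int) (out : Bool) : Prop := out = helper_alt total last_used remaining num
instance (total : Int) (last_used : Int) (remaining : Int) (num : Int) (out : Bool) : Decidable (Spec_helper total last_used remaining num out) := by unfold Spec_helper; infer_instance

-- ===== CLAIM =====
def Claim_equal_helper : Prop := ∀ (total : Int) (last_used : Int) (remaining : Int) (num : Int), Dom_helper total last_used remaining num → Spec_helper total last_used remaining num (helper total last_used remaining num)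

-- ===== LEMMAS AND PROOFS =====

lemma pv_remaining_sum (l : List Int) : remaining_sum l = l.sum := by
  simpa using PySem.List.foldl_add l (fun x : Int => x) 0

-- any fuel at least pvMu + 1 computes A's value
lemma helperGo_stable : ∀ (f : Nat) (t l r n : Int), pvMu t l n + 1 ≤ f →
    helperGo f t l r n = helper t l r n := by
  intro f
  induction f using Nat.strong_induction_on with
  | _ f IH =>
    intro t l r n hf
    obtain ⟨f', rfl⟩ : ∃ f', f = f' + 1 := ⟨f - 1, by omega⟩
    unfold helper
    simp only [helperGo]
    split_ifs with h0 hgt hpr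
    · rfl
    · rfl
    · rfl
    · apply PySem.List.any_congr_mem
      intro i hi
      rw [PySem.List.mem_pyRange_one] at hi
      obtain ⟨hi1, hi2⟩ := hi
      have ht : t ≤ n := by omega
      have hdec : pvMu (t + i * i) i n + 1 ≤ pvMu t l n :=
        pvMu_dec ht hi1 (by omega)
      have e1 : helperGo f' (t + i * i) i (r - 1) n = helper (t + i * i) i (r - 1) n :=
        IH f' (by omega) _ _ _ _ (by omega)
      have e2 : helperGo (pvMu t l n) (t + i * i) i (r - 1) n = helper (t + i * i) i (r - 1) n :=
        IH (pvMu t l n) (by omega) _ _ _ _ hdec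
      rw [e1, e2]

-- A's recursion characterized in terms of `helper` itself
lemma helper_eq (t l r n : Int) : helper t l r n =
    if r == 0 then t == n
    else if t > n then false
    else
      if t + ((PySem.List.pyRange 0 r 1).map
          (fun k => ((((n - t).toNat.sqrt : Int)) - k) ^ 2)).sum < n then false
      else
        (PySem.List.pyRange (l + 1) (((n - t).toNat.sqrt : Int) + 1) 1).any
          (fun i => helper (t + i * i) i (r - 1) n) := by
  conv_lhs => rw [helper]
  simp only [helperGo, pv_remaining_sum]
  split_ifs with h0 hgt hpr
  · rfl
  · rfl
  · rfl
  · apply PySem.List.any_congr_mem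
    intro i hi
    rw [PySem.List.mem_pyRange_one] at hi
    obtain ⟨hi1, hi2⟩ := hi
    have ht : t ≤ n := by omega
    exact helperGo_stable (pvMu t l n) _ _ _ _ (pvMu_dec ht hi1 (by omega))

-- for a frame the loop expands, A's value is `any` of A's values over the pushed children
lemma helper_expand (t l r n : Int) (h0 : ¬(r == 0) = true) (hgt : ¬t > n)
    (hpr : ¬t + ((PySem.List.pyRange 0 r 1).map
        (fun k => ((((n - t).toNat.sqrt : Int)) - k) ^ 2)).sum < n) :
    helper t l r n = ((PySem.List.pyRange (l + 1) (((n - t).toNat.sqrt : Int) + 1) 1).map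
        (fun i => (t + i * i, i, r - 1))).any (fun f => helper f.1 f.2.1 f.2.2 n) := by
  rw [helper_eq t l r n, if_neg h0, if_neg hgt, if_neg hpr, List.any_map]
  rfl

-- the stack loop computes `any` of A's values over the frames still on the stack
lemma dfsGo_any (num : Int) (stack : List (Int × Int × Int)) :
    dfsGo num stack = stack.any (fun f => helper f.1 f.2.1 f.2.2 num) := by
  induction stack using dfsGo.induct (num := num) with
  | case1 => simp [dfsGo]
  | case2 t l r rest h0 ht =>
    rw [dfsGo]
    simp only [List.any_cons, helper_eq t l r num, if_pos h0, ht]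
    simp
  | case3 t l r rest h0 ht ih =>
    rw [dfsGo]
    simp only [if_pos h0, if_neg ht, List.any_cons, ih, helper_eq t l r num]
    simp_all
  | case4 t l r rest h0 hgt ih =>
    rw [dfsGo]
    simp only [if_neg h0, dif_pos hgt, List.any_cons, ih, helper_eq t l r num]
    simp_all
  | case5 t l r rest h0 hgt hpr ih =>
    rw [dfsGo]
    simp only [if_neg h0, dif_neg hgt, if_pos hpr, List.any_cons, ih, helper_eq t l r num]
    simp_all
  | case6 t l r rest h0 hgt hpr ih =>
    rw [dfsGo]
    simp only [if_neg h0, dif_neg hgt, if_neg hpr, ih, List.any_append, List.any_cons]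
    rw [helper_expand t l r num h0 hgt hpr]

-- ===== VERDICT (by name: the statement is the Claim_ definition above) =====
theorem helper_spec : Claim_equal_helper := by
  intro total last_used remaining num _
  unfold Spec_helper helper_alt
  rw [dfsGo_any]
  simp
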